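-- pv_equiv track=rewrite | github.com/KotisKotlyandii/lessons1 | codeforces/1705B.py | f
-- ===== SOURCE A (Python) =====
-- def f(a):
--     r = 0
--     if a.count(0) == len(a):
--         return 0
--     for i in range(len(a)):
--         if a[i] != 0:
--             r = i
--             break
--     return a[r:-1].count(0) + sum(a[:-1])
-- ===== SOURCE B (Python) =====
-- def f(a):
--     n = len(a)
--     seen = False
--     total = 0
--     zeros = 0
--     for i in range(n):
--         if a[i] != 0:
--             seen = True
--         if i < n - 1:
--             total += a[i]
--             if seen and a[i] == 0:
--                 zeros += 1
--     return zeros + total if seen else 0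
-- ===== Notes on version B (the rewrite author's own statement) =====
-- stated objective: alternative
-- what changed: A's four separate list passes (count-all-zeros test, index-find loop, a slice count and a slice sum over fresh slice copies) are fused into one delayed-by-one scan over the elements maintaining (seen-nonzero, running sum, zero counter, previous element).
import Mathlib
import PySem

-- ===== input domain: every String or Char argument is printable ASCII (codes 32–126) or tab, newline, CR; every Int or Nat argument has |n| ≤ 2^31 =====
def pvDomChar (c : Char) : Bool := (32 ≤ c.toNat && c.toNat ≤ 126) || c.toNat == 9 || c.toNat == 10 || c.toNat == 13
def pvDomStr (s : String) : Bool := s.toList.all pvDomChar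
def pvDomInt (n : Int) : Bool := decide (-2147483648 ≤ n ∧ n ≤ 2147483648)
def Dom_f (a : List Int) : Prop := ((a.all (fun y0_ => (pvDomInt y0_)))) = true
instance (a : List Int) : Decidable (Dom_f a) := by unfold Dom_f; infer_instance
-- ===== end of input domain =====

-- B fuses A's count/find/slice-count/slice-sum into one delayed-by-one pass over the
-- elements (objective: alternative single-scan decomposition; not claimed faster).

-- ===== PORT A =====
-- the 'for i in range(len(a)): if a[i] != 0: r = i; break' loop of A
def fFind (a : List Int) (r : Int) : List Int → Int
  | [] => r
  | i :: rest => if PySem.List.pyGetD a i 0 ≠ 0 then i else fFind a r rest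

def f (a : List Int) : Int :=
  let r : Int := 0
  if PySem.List.count a 0 = a.length then 0
  else
    let r := fFind a r (PySem.List.pyRange 0 (a.length : Int) 1)
    ((PySem.List.count (PySem.List.slice a (some r) (some (-1))) 0 : Int))
      + (PySem.List.slice a none (some (-1))).sum

-- ===== PORT B =====
-- body of B's single 'for x in a' loop; state = (seen, total, zeros, prev)
def bstep (st : Bool × Int × Int × Option Int) (x : Int) : Bool × Int × Int × Option Int :=
  let seen := st.1
  let total := match st.2.2.2 with | some p => st.2.1 + p | none => st.2.1
  let zeros := match st.2.2.2 with
    | some p => if seen && p == 0 then st.2.2.1 + 1 else st.2.2.1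
    | none => st.2.2.1
  let seen := if x ≠ 0 then true else seen
  (seen, total, zeros, some x)

def f_alt (a : List Int) : Int :=
  let st := a.foldl bstep (false, 0, 0, none)
  if st.1 then st.2.2.1 + st.2.1 else 0

-- ===== PRECONDITION & SPEC =====
def Spec_f (a : List Int) (out : Int) : Prop := out = f_alt a
instance (a : List Int) (out : Int) : Decidable (Spec_f a out) := by unfold Spec_f; infer_instance

-- ===== CLAIM (what is proved, stated in full; the proofs are below) =====
def Claim_equal_f : Prop := ∀ (a : List Int), Dom_f a → Spec_f a (f a)

-- ===== LEMMAS AND PROOFS =====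

-- B's loop once the first nonzero has been seen: it sums the processed prefix and counts its zeros
theorem bstep_seen (t : List Int) : ∀ (p total zeros : Int),
    t.foldl bstep (true, total, zeros, some p)
      = (true, total + ((p :: t).dropLast).sum,
          zeros + (((p :: t).dropLast).count 0 : Int), some (t.getLastD p)) := by
  induction t with
  | nil => intro p total zeros; simp
  | cons q t ih =>
    intro p total zeros
    simp only [List.foldl_cons, bstep, ite_self]
    rw [ih]
    have hlast : ∀ pp : Int, (q :: t).getLast?.getD pp = t.getLast?.getD q := by
      intro pp; cases t <;> simp [List.getLast?_cons]
    by_cases hp : p = 0 <;>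
      simp [hp, hlast, add_assoc, add_comm, add_left_comm]

-- B's loop over an all-zero block with nothing seen yet does nothing
theorem bstep_zeros (z : List Int) (hz : ∀ y ∈ z, y = 0) :
    z.foldl bstep (false, 0, 0, some 0) = (false, 0, 0, some 0) := by
  induction z with
  | nil => rfl
  | cons q t ih =>
    have hq : q = 0 := hz q (by simp)
    simp only [List.foldl_cons, bstep, hq]
    exact ih (fun y hy => hz y (by simp [hy]))

-- A's index-find loop returns the first nonzero index
theorem fFind_spec (a : List Int) (k : Nat) (hk : k < a.length)
    (hnz : a.getD k 0 ≠ 0) (hzero : ∀ j : Nat, j < k → a.getD j 0 = 0) :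
    ∀ (s : Nat) (r : Int), s ≤ k →
      fFind a r (PySem.List.pyRange (s : Int) (a.length : Int) 1) = (k : Int) := by
  intro s r hs
  induction hd : k - s generalizing s with
  | zero =>
    have hsk : s = k := by omega
    subst hsk
    rw [PySem.List.pyRange_one_cons (by exact_mod_cast hk)]
    simp only [fFind, PySem.List.pyGetD_natCast, if_pos hnz]
  | succ n ih =>
    have hsk : s < k := by omega
    rw [PySem.List.pyRange_one_cons (by exact_mod_cast (by omega : s < a.length))]
    have h0 : a.getD s 0 = 0 := hzero s hsk
    simp only [fFind, PySem.List.pyGetD_natCast, h0]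
    have : ((s : Int) + 1) = ((s + 1 : Nat) : Int) := by push_cast; ring
    rw [this]
    simp only [ne_eq, not_true_eq_false]
    exact ih (s + 1) (by omega) (by omega)

-- ===== VERDICT (by name: the statement is the Claim_ definition above) =====
-- main equivalence, by cases on whether a is all-zero, decomposing a = zeros ++ x :: t otherwise
theorem f_eq_f_alt (a : List Int) : f a = f_alt a := by
  by_cases hall : ∀ y ∈ a, y = 0
  · have hc : List.count 0 a = a.length :=
      List.count_eq_length.mpr (fun y hy => (hall y hy).symm)
    have hA : f a = 0 := by simp [f, PySem.List.count_eq, hc]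
    cases a with
    | nil => simp [hA, f_alt]
    | cons x t =>
        have hx : x = 0 := hall x (by simp)
        subst hx
        have hz' : ∀ y ∈ t, y = 0 := fun y hy => hall y (List.mem_cons_of_mem _ hy)
        have h1 : List.foldl bstep (false, 0, 0, none) ((0 : Int) :: t)
            = (false, 0, 0, some 0) := by
          rw [List.foldl_cons,
            show bstep (false, 0, 0, none) (0 : Int) = (false, 0, 0, some 0) by simp [bstep]]
          exact bstep_zeros t hz'
        rw [hA]
        simp [f_alt, h1]
  · simp only [not_forall] at hall
    obtain ⟨y0, hy0mem, hy0⟩ := hall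
    set p : Int → Bool := fun y => y == 0 with hp
    have hdw : a.dropWhile p ≠ [] := by
      intro h
      rw [List.dropWhile_eq_nil_iff] at h
      exact hy0 (by simpa [hp] using h y0 hy0mem)
    obtain ⟨x, t, hd⟩ := List.exists_cons_of_ne_nil hdw
    have hx : x ≠ 0 := by
      have h := List.head_dropWhile_not p (l := a) hdw
      simp only [hd, List.head_cons] at h
      simpa [hp] using h
    obtain ⟨z, hzdef⟩ : ∃ z, z = a.takeWhile p := ⟨_, rfl⟩
    have ha : z ++ x :: t = a := by rw [hzdef, ← hd]; exact List.takeWhile_append_dropWhile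
    have hz : ∀ y ∈ z, y = 0 := by
      intro y hy
      rw [hzdef] at hy
      have := List.mem_takeWhile_imp hy
      simpa [hp] using this
    obtain ⟨k, hkdef⟩ : ∃ k, k = z.length := ⟨_, rfl⟩
    have hlen : a.length = k + t.length + 1 := by rw [← ha]; simp [hkdef]; omega
    have hk : k < a.length := by omega
    have hnz : a.getD k 0 ≠ 0 := by
      rw [← ha]
      have : (z ++ x :: t).getD z.length 0 = x := by
        simp [List.getD]
      rw [hkdef, this]
      exact hx
    have hzero : ∀ j : Nat, j < k → a.getD j 0 = 0 := by
      intro j hj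
      rw [← ha]
      have h1 : (z ++ x :: t).getD j 0 = z.getD j 0 := by
        simp [List.getD, List.getElem?_append_left (by omega : j < z.length)]
      rw [h1, List.getD_eq_getElem z 0 (by omega)]
      exact hz _ (List.getElem_mem _)
    -- A side
    have hcount : ¬ (List.count 0 a = a.length) := fun h =>
      hx ((List.count_eq_length.mp h x (by rw [← ha]; simp)).symm)
    have hfind : fFind a 0 (PySem.List.pyRange 0 (a.length : Int) 1) = (k : Int) := by
      have h := fFind_spec a k hk hnz hzero 0 0 (Nat.zero_le k)
      simpa using h
    have hslice2 : PySem.List.slice a (some (k : Int)) (some (-1)) = (x :: t).dropLast := by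
      simp only [PySem.List.slice, PySem.List.clampIdx_neg_one, PySem.List.clampIdx_natCast]
      rw [min_eq_left (by omega : k ≤ a.length)]
      rw [← ha, hkdef, List.drop_left (l₁ := z)]
      rw [List.dropLast_eq_take]
      congr 1
      simp only [List.length_append, List.length_cons]
      omega
    have hdropLast : a.dropLast = z ++ (x :: t).dropLast := by
      rw [← ha]
      exact List.dropLast_append_of_ne_nil (by simp)
    have hzsum : z.sum = 0 := List.sum_eq_zero hz
    have hA : f a = ((List.count 0 ((x :: t).dropLast) : Int)) + (x :: t).dropLast.sum := by
      simp only [f, hfind, hslice2, PySem.List.slice_to_neg_one,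
        PySem.List.count_eq, hdropLast, List.sum_append, hzsum, if_neg hcount]
      ring
    -- B side
    have hzfold : List.foldl bstep (false, 0, 0, none) (z ++ x :: t)
        = List.foldl bstep (true, 0, 0, some x) t := by
      cases z with
      | nil =>
          rw [List.nil_append, List.foldl_cons,
            show bstep (false, 0, 0, none) x = (true, 0, 0, some x) by simp [bstep, hx]]
      | cons z0 z' =>
          have hz0 : z0 = 0 := hz z0 (by simp)
          subst hz0
          have hz'' : ∀ y ∈ z', y = 0 := fun y hy => hz y (List.mem_cons_of_mem _ hy)
          rw [List.cons_append, List.foldl_cons,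
            show bstep (false, 0, 0, none) (0 : Int) = (false, 0, 0, some 0) by simp [bstep],
            List.foldl_append, bstep_zeros z' hz'', List.foldl_cons,
            show bstep (false, 0, 0, some 0) x = (true, 0, 0, some x) by simp [bstep, hx]]
    have hB : f_alt a = ((List.count 0 ((x :: t).dropLast) : Int)) + (x :: t).dropLast.sum := by
      rw [f_alt, ← ha, hzfold, bstep_seen t x 0 0]
      simp [add_comm]
    rw [hA, hB]

theorem f_spec : Claim_equal_f := by
  intro a _
  exact f_eq_f_alt a
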